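-- pv_equiv track=rewrite | github.com/ryan258/dotfiles | scripts/cyborg_agent.py | parse_gitnexus_list_output
-- ===== SOURCE A (Python) =====
-- from typing import Any, List, Optional, Tuple
--
-- def parse_gitnexus_list_output(output: str) -> list[dict[str, str]]:
--     """Parse the human-readable output of `gitnexus list` into a list
--     of dicts with keys like 'name', 'path', 'commit', etc.
--
--     The output uses indentation to separate repo names from their
--     details, so we track which repo block we are inside.
--     """
--     repos: list[dict[str, str]] = []
--     current: Optional[dict[str, str]] = None
--     for raw_line in output.splitlines():
--         line = raw_line.rstrip()
--         stripped = line.strip()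
--         # A blank line ends the current repo block.
--         if not stripped:
--             if current:
--                 repos.append(current)
--                 current = None
--             continue
--         # Skip the header line like "Indexed Repositories (3)".
--         if stripped.startswith("Indexed Repositories"):
--             continue
--         # A line indented 2 spaces (but not 4) with no colon is a repo name.
--         if line.startswith("  ") and not line.startswith("    ") and ":" not in stripped:
--             if current:
--                 repos.append(current)
--             current = {"name": stripped}
--             continue
--         # A line indented 4 spaces with a colon is a detail field.
--         if current and line.startswith("    ") and ":" in stripped:
--             key, value = stripped.split(":", 1)
--             current[key.lower()] = value.strip()
--     # Don't forget the last block if the output didn't end with a blank line.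
--     if current:
--         repos.append(current)
--     return repos
-- ===== SOURCE B (Python) =====
-- def _classify(raw_line):
--     """Classify one raw line into a token: ('blank',), ('name', s), ('detail', s) or ('other',)."""
--     line = raw_line.rstrip()
--     stripped = line.strip()
--     if not stripped:
--         return ('blank', '')
--     if stripped.startswith("Indexed Repositories"):
--         return ('other', '')
--     if line.startswith("  ") and not line.startswith("    ") and ":" not in stripped:
--         return ('name', stripped)
--     if line.startswith("    ") and ":" in stripped:
--         return ('detail', stripped)
--     return ('other', '')
--
--
-- def parse_gitnexus_list_output(output: str) -> list:
--     """Tokenize the lines first, then assemble repos by consuming tokens: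
--     at each name token, absorb following detail/other tokens until a blank
--     or the next name; anything outside a block is skipped."""
--     toks = [_classify(l) for l in output.splitlines()]
--     repos = []
--     i = 0
--     n = len(toks)
--     while i < n:
--         kind, text = toks[i]
--         i += 1
--         if kind != 'name':
--             continue
--         d = {'name': text}
--         while i < n and toks[i][0] in ('detail', 'other'):
--             if toks[i][0] == 'detail':
--                 k, v = toks[i][1].split(':', 1)
--                 d[k.lower()] = v.strip()
--             i += 1
--         repos.append(d)
--     return repos
-- ===== Notes on version B (the rewrite author's own statement) =====
-- stated objective: alternative
-- what changed: B first classifies every line into a token (blank/name/detail/other) and then assembles repos by a consumer loop that, at each name token, absorbs the following detail tokens until a blank or the next name, instead of A's single fold that threads an optional open dict through every line.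
import Mathlib
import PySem

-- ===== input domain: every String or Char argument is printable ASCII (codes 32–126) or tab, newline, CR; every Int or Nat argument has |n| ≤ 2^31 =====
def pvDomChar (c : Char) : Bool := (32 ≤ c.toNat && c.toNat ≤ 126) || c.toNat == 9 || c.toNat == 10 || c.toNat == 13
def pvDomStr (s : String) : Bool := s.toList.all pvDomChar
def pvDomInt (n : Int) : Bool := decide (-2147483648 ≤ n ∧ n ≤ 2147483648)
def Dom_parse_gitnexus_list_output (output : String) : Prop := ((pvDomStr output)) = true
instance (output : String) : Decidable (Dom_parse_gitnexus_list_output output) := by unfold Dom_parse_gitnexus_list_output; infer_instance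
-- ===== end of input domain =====

-- B is an alternative decomposition (classify every line into a token, then a consumer loop
-- assembles the blocks); same asymptotic cost.

-- ===== PORT A =====
-- one iteration of A's loop over (repos, current)
def pyAStep (st : List (PySem.Dict String String) × Option (PySem.Dict String String))
    (rawLine : String) :
    List (PySem.Dict String String) × Option (PySem.Dict String String) :=
  let line := PySem.Str.rstrip rawLine
  let stripped := PySem.Str.strip line
  if stripped = "" then
    match st.2 with
    | some cur => (st.1 ++ [cur], none)
    | none => st
  else if PySem.Str.startswith stripped "Indexed Repositories" then st
  else if PySem.Str.startswith line "  " && !(PySem.Str.startswith line "    ")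
      && !(PySem.Str.isIn ":" stripped) then
    ((match st.2 with | some cur => st.1 ++ [cur] | none => st.1),
     some (PySem.Dict.ofList [("name", stripped)]))
  else
    match st.2 with
    | some cur =>
      if PySem.Str.startswith line "    " && PySem.Str.isIn ":" stripped then
        match PySem.Str.splitMax? stripped ":" 1 with
        | some (key :: value :: _) =>
            (st.1, some (cur.insert (PySem.Str.lower key) (PySem.Str.strip value)))
        | _ => st   -- unreachable: ":" ∈ stripped ⇒ split yields two pieces (totality only)
      else st
    | none => st

def parse_gitnexus_list_output (output : String) : List (List (String × String)) :=
  let fin := (PySem.Str.splitlines output).foldl pyAStep ([], none)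
  let repos := match fin.2 with | some cur => fin.1 ++ [cur] | none => fin.1
  repos.map PySem.Dict.items

-- ===== PORT B =====
-- token classifying one line (B's _classify)
inductive PvTok
  | blank
  | other
  | name : String → PvTok
  | detail : String → PvTok
deriving DecidableEq, Repr

def pvClassify (rawLine : String) : PvTok :=
  let line := PySem.Str.rstrip rawLine
  let stripped := PySem.Str.strip line
  if stripped = "" then .blank
  else if PySem.Str.startswith stripped "Indexed Repositories" then .other
  else if PySem.Str.startswith line "  " && !(PySem.Str.startswith line "    ")
      && !(PySem.Str.isIn ":" stripped) then .name stripped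
  else if PySem.Str.startswith line "    " && PySem.Str.isIn ":" stripped then .detail stripped
  else .other

-- B's inner while loop: absorb detail/other tokens into the open dict, stop at blank/name/end
def pvCollect (d : PySem.Dict String String) :
    List PvTok → PySem.Dict String String × List PvTok
  | [] => (d, [])
  | .detail s :: ts =>
      pvCollect (match PySem.Str.splitMax? s ":" 1 with
        | some (key :: value :: _) => d.insert (PySem.Str.lower key) (PySem.Str.strip value)
        | _ => d) ts
  | .other :: ts => pvCollect d ts
  | .blank :: ts => (d, .blank :: ts)
  | .name s :: ts => (d, .name s :: ts)

lemma pvCollect_snd_length (ts : List PvTok) :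
    ∀ d : PySem.Dict String String, ((pvCollect d ts).2).length ≤ ts.length := by
  induction ts with
  | nil => intro d; simp [pvCollect]
  | cons t ts ih =>
    intro d
    cases t with
    | blank => simp [pvCollect]
    | name s => simp [pvCollect]
    | other => exact Nat.le_succ_of_le (ih d)
    | detail s => exact Nat.le_succ_of_le (ih _)

-- B's outer while loop: skip tokens until a name, then open a block via pvCollect
def pvAssemble : List PvTok → List (PySem.Dict String String)
  | [] => []
  | .name s :: ts =>
      let r := pvCollect (PySem.Dict.ofList [("name", s)]) ts
      r.1 :: pvAssemble r.2
  | .blank :: ts => pvAssemble ts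
  | .other :: ts => pvAssemble ts
  | .detail _ :: ts => pvAssemble ts
termination_by ts => ts.length
decreasing_by
  · exact Nat.lt_succ_of_le (pvCollect_snd_length _ _)
  all_goals simp

def parse_gitnexus_list_output_alt (output : String) : List (List (String × String)) :=
  (pvAssemble ((PySem.Str.splitlines output).map pvClassify)).map PySem.Dict.items

-- ===== PRECONDITION & SPEC =====
def Spec_parse_gitnexus_list_output (output : String) (out : List (List (String × String))) : Prop := out = parse_gitnexus_list_output_alt output
instance (output : String) (out : List (List (String × String))) : Decidable (Spec_parse_gitnexus_list_output output out) := by unfold Spec_parse_gitnexus_list_output; infer_instance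

-- ===== CLAIM =====
def Claim_equal_parse_gitnexus_list_output : Prop := ∀ (output : String), Dom_parse_gitnexus_list_output output → Spec_parse_gitnexus_list_output output (parse_gitnexus_list_output output)

-- ===== LEMMAS AND PROOFS =====

-- A's step, re-expressed on the token of the line
def pvTokStep (st : List (PySem.Dict String String) × Option (PySem.Dict String String)) :
    PvTok → List (PySem.Dict String String) × Option (PySem.Dict String String)
  | .blank => match st.2 with
      | some cur => (st.1 ++ [cur], none)
      | none => st
  | .other => st
  | .name s => ((match st.2 with | some cur => st.1 ++ [cur] | none => st.1),
      some (PySem.Dict.ofList [("name", s)]))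
  | .detail s => match st.2 with
      | some cur =>
        (st.1, some (match PySem.Str.splitMax? s ":" 1 with
          | some (key :: value :: _) => cur.insert (PySem.Str.lower key) (PySem.Str.strip value)
          | _ => cur))
      | none => st

lemma pv_step_tok (st : List (PySem.Dict String String) × Option (PySem.Dict String String))
    (raw : String) : pyAStep st raw = pvTokStep st (pvClassify raw) := by
  obtain ⟨repos, cur⟩ := st
  unfold pyAStep pvClassify
  cases cur with
  | none =>
    dsimp only
    split_ifs <;> simp [pvTokStep]
  | some c =>
    dsimp only
    split_ifs with h1 h2 h3 h4
    · rfl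
    · rfl
    · rfl
    · rcases hsp : PySem.Str.splitMax? (PySem.Str.strip (PySem.Str.rstrip raw)) ":" 1 with
        _ | ⟨_ | ⟨k, _ | ⟨v, t⟩⟩⟩ <;> simp [pvTokStep, hsp]
    · rfl

lemma pv_fold_tok (lines : List String)
    (st : List (PySem.Dict String String) × Option (PySem.Dict String String)) :
    lines.foldl pyAStep st = (lines.map pvClassify).foldl pvTokStep st := by
  induction lines generalizing st with
  | nil => rfl
  | cons raw rest ih => simp only [List.foldl_cons, List.map_cons, pv_step_tok, ih]

-- finalize A's loop state
def pvFinal (fin : List (PySem.Dict String String) × Option (PySem.Dict String String)) :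
    List (PySem.Dict String String) :=
  match fin.2 with | some cur => fin.1 ++ [cur] | none => fin.1

-- the core invariant: A's token fold, finalized, equals B's assemble (closed and open forms)
lemma pv_main (toks : List PvTok) :
    (∀ repos, pvFinal (toks.foldl pvTokStep (repos, none)) = repos ++ pvAssemble toks)
    ∧ (∀ repos d, pvFinal (toks.foldl pvTokStep (repos, some d))
        = repos ++ ((pvCollect d toks).1 :: pvAssemble ((pvCollect d toks).2))) := by
  induction toks with
  | nil =>
    constructor
    · intro repos; simp [pvFinal, pvAssemble]
    · intro repos d; simp [pvFinal, pvCollect, pvAssemble]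
  | cons t ts ih =>
    obtain ⟨ihc, iho⟩ := ih
    constructor
    · intro repos
      cases t with
      | blank => simpa [pvTokStep, pvAssemble] using ihc repos
      | other => simpa [pvTokStep, pvAssemble] using ihc repos
      | detail s => simpa [pvTokStep, pvAssemble] using ihc repos
      | name s =>
        simp only [List.foldl_cons, pvTokStep, pvAssemble]
        exact iho repos _
    · intro repos d
      cases t with
      | blank =>
        simp only [List.foldl_cons, pvTokStep, pvCollect]
        rw [ihc (repos ++ [d])]
        simp [pvAssemble]
      | other =>
        simp only [List.foldl_cons, pvTokStep, pvCollect]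
        exact iho repos d
      | detail s =>
        simp only [List.foldl_cons, pvTokStep, pvCollect]
        exact iho repos _
      | name s =>
        simp only [List.foldl_cons, pvTokStep, pvCollect]
        rw [iho (repos ++ [d]) _]
        simp [pvAssemble]

-- ===== VERDICT =====
theorem parse_gitnexus_list_output_spec : Claim_equal_parse_gitnexus_list_output := by
  intro output _
  unfold Spec_parse_gitnexus_list_output parse_gitnexus_list_output parse_gitnexus_list_output_alt
  rw [pv_fold_tok]
  have h := (pv_main ((PySem.Str.splitlines output).map pvClassify)).1 []
  simp only [List.nil_append] at h
  show (pvFinal _).map PySem.Dict.items = _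
  rw [h]
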